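-- pv_equiv track=rewrite | github.com/Megha-Bose/Adaptive-MTD | NetworkMTD/utils.py | state_one_hot_encoding_to_state
-- ===== SOURCE A (Python) =====
-- def state_one_hot_encoding_to_state(state_ohc_vector, state_factors):
--     state = []
--     i = 0
--     for _, values in state_factors.items():
--         for value in values:
--             if state_ohc_vector[i] == 1:
--                 state.append(value)
--             i+=1
--     return tuple(state)
-- ===== SOURCE B (Python) =====
-- def state_one_hot_encoding_to_state(state_ohc_vector, state_factors):
--     ones = [i for i, b in enumerate(state_ohc_vector) if b == 1]
--     result = []
--     offset = 0
--     for values in state_factors.values():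
--         for i in ones:
--             if offset <= i < offset + len(values):
--                 result.append(values[i - offset])
--         offset += len(values)
--     return tuple(result)
-- ===== Notes on version B (the rewrite author's own statement) =====
-- stated objective: alternative
-- what changed: B inverts the traversal: it first collects the list of set-bit positions of the one-hot vector, then for each factor selects values by an interval test on those positions with random-access indexing, instead of A's nested walk over every value with a running index counter.
import Mathlib
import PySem

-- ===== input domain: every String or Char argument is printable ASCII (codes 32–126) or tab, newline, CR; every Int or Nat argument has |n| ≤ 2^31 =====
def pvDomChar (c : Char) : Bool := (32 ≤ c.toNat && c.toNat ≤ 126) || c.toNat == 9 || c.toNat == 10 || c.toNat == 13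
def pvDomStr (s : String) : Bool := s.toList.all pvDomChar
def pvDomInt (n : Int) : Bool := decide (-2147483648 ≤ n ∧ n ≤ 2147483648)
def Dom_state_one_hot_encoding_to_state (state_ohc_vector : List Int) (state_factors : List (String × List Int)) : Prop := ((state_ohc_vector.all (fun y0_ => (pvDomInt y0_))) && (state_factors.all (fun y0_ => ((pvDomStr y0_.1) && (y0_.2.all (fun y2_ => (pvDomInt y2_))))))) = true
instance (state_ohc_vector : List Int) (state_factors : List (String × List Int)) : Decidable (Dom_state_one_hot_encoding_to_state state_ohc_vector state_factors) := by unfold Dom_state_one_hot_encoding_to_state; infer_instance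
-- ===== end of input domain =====

-- B inverts A's traversal: it first collects the list of set-bit positions of the vector,
-- then for each factor selects by an interval test plus random-access indexing, with no
-- flattening and no running value counter (objective: alternative; return value only).

-- ===== PORT A =====
-- inner 'for value in values' loop: threads (state, i); none = IndexError from state_ohc_vector[i]
def pvAInner (vec : List Int) (values : List Int) (state : List Int) (i : Int) :
    Option (List Int × Int) :=
  match values with
  | [] => some (state, i)
  | v :: rest =>
    match PySem.List.pyGet? vec i with
    | none => none
    | some x => pvAInner vec rest (if x = 1 then state ++ [v] else state) (i + 1)

-- outer 'for _, values in state_factors.items()' loop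
def pvAOuter (vec : List Int) (factors : List (String × List Int)) (state : List Int) (i : Int) :
    Option (List Int × Int) :=
  match factors with
  | [] => some (state, i)
  | (_, values) :: rest =>
    match pvAInner vec values state i with
    | none => none
    | some p => pvAOuter vec rest p.1 p.2

def state_one_hot_encoding_to_state (state_ohc_vector : List Int) (state_factors : List (String × List Int)) : List Int :=
  ((pvAOuter state_ohc_vector state_factors [] 0).map Prod.fst).getD []

-- ===== PORT B =====
-- ones = [i for i, b in enumerate(vec) if b == 1]
def pvOnes (vec : List Int) : List Int :=
  (PySem.List.enumerate vec).filterMap (fun p => if p.2 == 1 then some p.1 else none)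

-- the inner 'for i in ones' loop of one factor (guard ensures the index is in range;
-- getD 0 is only a totality default, never reached)
def pvBFact (ones : List Int) (values : List Int) (offset : Int) : List Int :=
  (ones.filter (fun i => offset ≤ i && i < offset + values.length)).map
    (fun i => (PySem.List.pyGet? values (i - offset)).getD 0)

-- the outer 'for values in state_factors.values()' loop, threading (result, offset)
def pvBOuter (ones : List Int) (fs : List (String × List Int)) (offset : Int) (result : List Int) : List Int :=
  match fs with
  | [] => result
  | (_, values) :: rest => pvBOuter ones rest (offset + values.length) (result ++ pvBFact ones values offset)

def state_one_hot_encoding_to_state_alt (state_ohc_vector : List Int) (state_factors : List (String × List Int)) : List Int :=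
  pvBOuter (pvOnes state_ohc_vector) state_factors 0 []

-- ===== PRECONDITION & SPEC =====
-- Pre_ excludes vectors shorter than the total number of factor values: there Python A
-- raises IndexError (state_ohc_vector[i] out of range).
def Pre_state_one_hot_encoding_to_state (state_ohc_vector : List Int) (state_factors : List (String × List Int)) : Prop :=
  (state_factors.flatMap (fun p => p.2)).length ≤ state_ohc_vector.length
instance (state_ohc_vector : List Int) (state_factors : List (String × List Int)) : Decidable (Pre_state_one_hot_encoding_to_state state_ohc_vector state_factors) := by unfold Pre_state_one_hot_encoding_to_state; infer_instance

def pvWitness_state_one_hot_encoding_to_state : List Int × (List (String × List Int)) :=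
  ([1, 0, 1], [("a", [3, 4]), ("b", [5])])

def Spec_state_one_hot_encoding_to_state (state_ohc_vector : List Int) (state_factors : List (String × List Int)) (out : List Int) : Prop := out = state_one_hot_encoding_to_state_alt state_ohc_vector state_factors
instance (state_ohc_vector : List Int) (state_factors : List (String × List Int)) (out : List Int) : Decidable (Spec_state_one_hot_encoding_to_state state_ohc_vector state_factors out) := by unfold Spec_state_one_hot_encoding_to_state; infer_instance

-- ===== CLAIM (what is proved, stated in full; the proofs are below) =====
def Claim_equal_state_one_hot_encoding_to_state : Prop := ∀ (state_ohc_vector : List Int) (state_factors : List (String × List Int)), Dom_state_one_hot_encoding_to_state state_ohc_vector state_factors → Pre_state_one_hot_encoding_to_state state_ohc_vector state_factors → Spec_state_one_hot_encoding_to_state state_ohc_vector state_factors (state_one_hot_encoding_to_state state_ohc_vector state_factors)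


-- ===== LEMMAS AND PROOFS =====

-- ---- A-side characterization: result = filter over the zipped flat list ----

theorem pvAInner_append (vec : List Int) (xs ys : List Int) (s : List Int) (i : Int) :
    pvAInner vec (xs ++ ys) s i =
      (pvAInner vec xs s i).bind (fun p => pvAInner vec ys p.1 p.2) := by
  induction xs generalizing s i with
  | nil => simp [pvAInner]
  | cons v rest ih =>
    simp only [List.cons_append, pvAInner]
    cases PySem.List.pyGet? vec i with
    | none => rfl
    | some x => exact ih _ _

theorem pvAOuter_flat (vec : List Int) (fs : List (String × List Int)) (s : List Int) (i : Int) :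
    pvAOuter vec fs s i = pvAInner vec (fs.flatMap (fun p => p.2)) s i := by
  induction fs generalizing s i with
  | nil => simp [pvAOuter, pvAInner]
  | cons f rest ih =>
    obtain ⟨name, values⟩ := f
    simp only [pvAOuter, List.flatMap_cons, pvAInner_append]
    cases h : pvAInner vec values s i with
    | none => rfl
    | some p => simp [Option.bind, ih]

theorem pvAInner_ok (vec xs s : List Int) (i : Nat) (h : i + xs.length ≤ vec.length) :
    pvAInner vec xs s (i : Int) =
      some (s ++ ((xs.zip (vec.drop i)).filter (fun p => p.2 == 1)).map Prod.fst,
            (i : Int) + xs.length) := by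
  induction xs generalizing s i with
  | nil => simp [pvAInner]
  | cons v rest ih =>
    have hi : i < vec.length := by simp at h; omega
    have hdrop : vec.drop i = vec[i] :: vec.drop (i + 1) := List.drop_eq_getElem_cons hi
    have hget : PySem.List.pyGet? vec (i : Int) = some vec[i] := by
      simp [PySem.List.pyGet?_natCast, List.getElem?_eq_getElem hi]
    have h' : (i + 1) + rest.length ≤ vec.length := by simp at h ⊢; omega
    have ihi := ih (if vec[i] = 1 then s ++ [v] else s) (i + 1) h'
    simp only [pvAInner, hget, hdrop, List.zip_cons_cons, List.filter_cons]
    push_cast at ihi ⊢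
    rw [ihi]
    by_cases hx : vec[i] = 1
    · simp [hx, List.append_assoc]
      ring_nf
    · simp [hx]
      omega

-- ---- B-side: properties of the ones list ----

theorem pvOnes_pairwise (vec : List Int) : (pvOnes vec).Pairwise (· < ·) := by
  unfold pvOnes
  refine List.Pairwise.filterMap _ (R := fun p q : Int × Int => p.1 < q.1) ?_ (PySem.List.pairwise_lt_enumerate vec 0)
  intro a b hab x hx y hy
  by_cases ha : a.2 == 1 <;> by_cases hb : b.2 == 1 <;> simp [ha, hb] at hx hy
  omega

theorem mem_pvOnes (vec : List Int) (k : Nat) (hk : k < vec.length) :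
    ((k : Int) ∈ pvOnes vec) ↔ vec[k] = 1 := by
  unfold pvOnes
  simp only [List.mem_filterMap, PySem.List.mem_enumerate_iff]
  constructor
  · rintro ⟨p, ⟨j, hj, rfl⟩, hp⟩
    by_cases h1 : vec[j] = 1
    · simp [h1] at hp
      have : j = k := by omega
      subst this; exact h1
    · simp [h1] at hp
  · intro h1
    exact ⟨((k : Int), vec[k]), ⟨k, hk, by simp⟩, by simp [h1]⟩

-- ---- B-side: structure of per-factor selection ----

theorem pvGet_shift (v : Int) (rest : List Int) (i j : Int) (h : i < j) :
    (PySem.List.pyGet? (v :: rest) (j - i)).getD 0 = (PySem.List.pyGet? rest (j - (i + 1))).getD 0 := by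
  have h1 : j - i = (((j - (i + 1)).toNat : Int)) + 1 := by omega
  rw [h1, PySem.List.pyGet?_cons_succ]
  congr 2
  omega

theorem pvBFact_nil (ones : List Int) (off : Int) : pvBFact ones [] off = [] := by
  unfold pvBFact
  have : ones.filter (fun i => off ≤ i && i < off + ([] : List Int).length) = [] := by
    apply List.filter_eq_nil_iff.mpr
    intro a _
    simp
  rw [this]; rfl

theorem pvBFact_shift (os : List Int) (v : Int) (rest : List Int) (i : Int)
    (h : ∀ k ∈ os, i < k) :
    pvBFact os (v :: rest) i = pvBFact os rest (i + 1) := by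
  induction os with
  | nil => rfl
  | cons j os' ih =>
    have hj : i < j := h j (by simp)
    have ih' := ih (fun k hk => h k (by simp [hk]))
    unfold pvBFact at ih' ⊢
    by_cases hkeep : j < i + 1 + (rest.length : Int)
    · rw [List.filter_cons_of_pos (by simp <;> omega),
          List.filter_cons_of_pos (by simp <;> omega)]
      simp only [List.map_cons]
      rw [pvGet_shift v rest i j hj, ih']
    · rw [List.filter_cons_of_neg (by simp; intro _; omega),
          List.filter_cons_of_neg (by simp; intro _; omega)]
      exact ih'

theorem pvBFact_cons (ones : List Int) (v : Int) (rest : List Int) (i : Int)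
    (hp : ones.Pairwise (· < ·)) :
    pvBFact ones (v :: rest) i =
      (if i ∈ ones then [v] else []) ++ pvBFact ones rest (i + 1) := by
  induction ones with
  | nil => simp [pvBFact]
  | cons j os ih =>
    have hj : ∀ k ∈ os, j < k := fun k hk => (List.pairwise_cons.mp hp).1 k hk
    have hpo : os.Pairwise (· < ·) := (List.pairwise_cons.mp hp).2
    rcases lt_trichotomy j i with hlt | heq | hgt
    · -- j < i: j is dropped by every filter
      have e1 : pvBFact (j :: os) (v :: rest) i = pvBFact os (v :: rest) i := by
        unfold pvBFact
        rw [List.filter_cons_of_neg (by simp; omega)]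
      have e2 : pvBFact (j :: os) rest (i + 1) = pvBFact os rest (i + 1) := by
        unfold pvBFact
        rw [List.filter_cons_of_neg (by simp; omega)]
      have hmem : (i ∈ j :: os) ↔ (i ∈ os) := by
        simp [List.mem_cons, show ¬ i = j from by omega]
      rw [e1, e2, ih hpo]
      congr 1
      exact if_congr hmem.symm rfl rfl
    · -- j = i: the head is selected and yields v
      subst heq
      have e1 : pvBFact (j :: os) (v :: rest) j = v :: pvBFact os (v :: rest) j := by
        unfold pvBFact
        rw [List.filter_cons_of_pos (by simp)]
        simp
      have e2 : pvBFact (j :: os) rest (j + 1) = pvBFact os rest (j + 1) := by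
        unfold pvBFact
        rw [List.filter_cons_of_neg (by simp)]
      rw [e1, pvBFact_shift os v rest j hj, e2, if_pos (by simp)]
      rfl
    · -- i < j: i is in neither list; pure shift
      have hni : ¬ (i ∈ j :: os) := by
        simp only [List.mem_cons]
        rintro (rfl | hmem)
        · omega
        · exact absurd (hj i hmem) (by omega)
      rw [if_neg hni, List.nil_append]
      exact pvBFact_shift (j :: os) v rest i
        (by
          intro k hk
          rcases List.mem_cons.mp hk with rfl | hk'
          · exact hgt
          · exact lt_trans hgt (hj k hk'))

theorem pvBFact_append (ones : List Int) (V R : List Int) (off : Int)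
    (hp : ones.Pairwise (· < ·)) :
    pvBFact ones (V ++ R) off = pvBFact ones V off ++ pvBFact ones R (off + V.length) := by
  induction V generalizing off with
  | nil => simp [pvBFact_nil]
  | cons v V' ih =>
    rw [List.cons_append, pvBFact_cons ones v (V' ++ R) off hp, ih (off + 1),
        pvBFact_cons ones v V' off hp]
    have : off + 1 + (V'.length : Int) = off + ((v :: V').length : Int) := by
      simp; omega
    rw [this, List.append_assoc]

theorem pvBOuter_eq (ones : List Int) (fs : List (String × List Int)) (off : Int) (acc : List Int)
    (hp : ones.Pairwise (· < ·)) :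
    pvBOuter ones fs off acc = acc ++ pvBFact ones (fs.flatMap (fun p => p.2)) off := by
  induction fs generalizing off acc with
  | nil => simp [pvBOuter, pvBFact_nil]
  | cons f rest ih =>
    obtain ⟨name, V⟩ := f
    simp only [pvBOuter, List.flatMap_cons]
    rw [ih, pvBFact_append ones V _ off hp, List.append_assoc]

theorem pvBFact_zip (vec : List Int) (F : List Int) (i : Nat)
    (h : i + F.length ≤ vec.length) :
    pvBFact (pvOnes vec) F (i : Int) =
      ((F.zip (vec.drop i)).filter (fun p => p.2 == 1)).map Prod.fst := by
  induction F generalizing i with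
  | nil => simp [pvBFact_nil]
  | cons v rest ih =>
    have hi : i < vec.length := by simp at h; omega
    have hdrop : vec.drop i = vec[i] :: vec.drop (i + 1) := List.drop_eq_getElem_cons hi
    have h' : (i + 1) + rest.length ≤ vec.length := by simp at h ⊢; omega
    rw [pvBFact_cons _ v rest _ (pvOnes_pairwise vec)]
    have hcast : ((i : Int) + 1) = (((i + 1 : Nat)) : Int) := by push_cast; ring
    rw [hcast, ih (i + 1) h']
    rw [hdrop, List.zip_cons_cons, List.filter_cons]
    by_cases hx : vec[i] = 1
    · have hmem : ((i : Int) ∈ pvOnes vec) := (mem_pvOnes vec i hi).mpr hx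
      simp [hmem, hx]
    · have hmem : ¬ ((i : Int) ∈ pvOnes vec) := fun hm => hx ((mem_pvOnes vec i hi).mp hm)
      simp [hmem, hx]

-- ===== VERDICT (by name: the statement is the Claim_ definition above) =====
theorem state_one_hot_encoding_to_state_spec : Claim_equal_state_one_hot_encoding_to_state := by
  intro vec fs _ hpre
  unfold Spec_state_one_hot_encoding_to_state state_one_hot_encoding_to_state state_one_hot_encoding_to_state_alt
  rw [pvAOuter_flat]
  have hlen : (0 : Nat) + (fs.flatMap (fun p => p.2)).length ≤ vec.length := by
    unfold Pre_state_one_hot_encoding_to_state at hpre; simpa using hpre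
  have h0 : (0 : Int) = ((0 : Nat) : Int) := rfl
  rw [h0, pvAInner_ok vec _ [] 0 hlen]
  rw [pvBOuter_eq _ _ _ _ (pvOnes_pairwise vec), pvBFact_zip vec _ 0 hlen]
  simp
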